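-- pv_equiv track=rewrite | github.com/daveMmd/rem | Classbench_2.py | get_nxt
-- ===== SOURCE A (Python) =====
-- def get_nxt(cur, max_length):
-- 	last_length = 1
-- 	for i in range(18):
-- 		length = (1<<i)
-- 		if length>max_length:
-- 			return (cur + last_length -1)
-- 		if (cur&(1<<i)):
-- 			return (cur + length -1)
-- 		last_length = length
-- ===== SOURCE B (Python) =====
-- def get_nxt(cur, max_length):
--     if max_length < 1:
--         return cur
--     step = 1 << (max_length.bit_length() - 1)  # largest power of two not exceeding max_length
--     low = cur & -cur                           # lowest set bit of cur (0 when cur == 0)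
--     if low and low <= step:
--         return cur + low - 1
--     return cur + step - 1
-- ===== Notes on version B (the rewrite author's own statement) =====
-- stated objective: idiomatic
-- what changed: Replaced the 18-iteration bit-scanning loop with a loop-free closed form: the lowest set bit via cur & -cur and the largest power of two not exceeding max_length via int.bit_length, combined by one comparison; Pre_ excludes only the inputs where A falls off its loop and returns None (all 18 low bits of cur zero and max_length >= 2**17).
-- outside the precondition, e.g. on get_nxt(0, 131072): A returns None, B returns 131071; on get_nxt(262144, 131072): A returns None, B returns 393215
import Mathlib
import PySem

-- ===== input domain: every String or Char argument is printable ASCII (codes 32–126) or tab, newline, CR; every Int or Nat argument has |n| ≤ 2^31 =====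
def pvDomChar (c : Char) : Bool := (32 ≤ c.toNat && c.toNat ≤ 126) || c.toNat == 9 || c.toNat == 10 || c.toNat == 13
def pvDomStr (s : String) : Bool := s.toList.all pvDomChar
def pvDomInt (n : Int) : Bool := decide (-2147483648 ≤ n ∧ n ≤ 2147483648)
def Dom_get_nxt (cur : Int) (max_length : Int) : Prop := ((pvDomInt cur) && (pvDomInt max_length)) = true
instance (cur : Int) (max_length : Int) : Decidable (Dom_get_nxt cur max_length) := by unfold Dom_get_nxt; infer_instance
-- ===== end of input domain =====

-- B replaces A's 18-iteration bit-scanning loop by a loop-free closed form (lowest set bit via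
-- cur & -cur, largest power of two ≤ max_length via int.bit_length). Pre_ excludes only the
-- inputs where A falls off its loop and returns None.


-- ===== PORT A =====
-- literal port of A's `for i in range(18)` loop with early returns; the [] case is Python's
-- fall-through `return None` (excluded by Pre_get_nxt)
def get_nxt_loop (cur : Int) (max_length : Int) (is : List Nat) (last_length : Int) : Int :=
  match is with
  | [] => 0
  | i :: rest =>
    let length : Int := (1:Int) <<< i
    if length > max_length then cur + last_length - 1
    else if PySem.Int.band cur ((1:Int) <<< i) ≠ 0 then cur + length - 1
    else get_nxt_loop cur max_length rest length

def get_nxt (cur : Int) (max_length : Int) : Int :=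
  get_nxt_loop cur max_length (List.range 18) 1

-- ===== PORT B =====
-- literal port of Source B (`if low and low <= step` = low ≠ 0 ∧ low ≤ step)
def get_nxt_alt (cur : Int) (max_length : Int) : Int :=
  if max_length < 1 then cur
  else
    let step : Int := (1:Int) <<< (PySem.Int.bitLength max_length - 1)
    let low : Int := PySem.Int.band cur (-cur)
    if low ≠ 0 ∧ low ≤ step then cur + low - 1
    else cur + step - 1

-- ===== PRECONDITION & SPEC =====
-- Pre_ excludes exactly the inputs on which Python A returns None (no int value): all of the
-- low 18 bits of cur zero together with max_length ≥ 2^17; B returns an int there.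
def Pre_get_nxt (cur : Int) (max_length : Int) : Prop :=
  ¬(cur % 262144 = 0 ∧ 131072 ≤ max_length)
instance (cur : Int) (max_length : Int) : Decidable (Pre_get_nxt cur max_length) := by
  unfold Pre_get_nxt; infer_instance

def pvWitness_get_nxt : Int × Int := (1, 1)

def Spec_get_nxt (cur : Int) (max_length : Int) (out : Int) : Prop := out = get_nxt_alt cur max_length
instance (cur : Int) (max_length : Int) (out : Int) : Decidable (Spec_get_nxt cur max_length out) := by unfold Spec_get_nxt; infer_instance

-- ===== CLAIM (what is proved, stated in full; the proofs are below) =====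
def Claim_equal_get_nxt : Prop := ∀ (cur : Int) (max_length : Int), Dom_get_nxt cur max_length → Pre_get_nxt cur max_length → Spec_get_nxt cur max_length (get_nxt cur max_length)

-- ===== LEMMAS AND PROOFS =====

-- (1 : Int) <<< n = 2 ^ n
lemma one_shl (n : Nat) : (1 : Int) <<< n = 2 ^ n := by
  rw [Int.shiftLeft_eq, one_mul]

-- cast of a Nat mod a power of two
lemma natmod_cast (a k : Nat) : ((a % 2 ^ k : Nat) : Int) = (a : Int) % 2 ^ k := by
  push_cast; ring_nf

-- emod of -(n+1) for a nonnegative n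
lemma neg_succ_emod (n : Nat) (m : Int) (hm : 0 < m) :
    (-(n : Int) - 1) % m = m - 1 - (n : Int) % m := by
  have h1 : (-(n : Int) - 1) = (m - 1 - (n : Int) % m) + m * (-( (n : Int) / m) - 1) := by
    linear_combination Int.ediv_add_emod (n : Int) m
  rw [h1, Int.add_mul_emod_self_left]
  exact Int.emod_eq_of_lt
    (by have := Int.emod_lt_of_pos (n : Int) hm; omega)
    (by have := Int.emod_nonneg (n : Int) (by omega : m ≠ 0); omega)

-- Nat: the next-bit decomposition of mod, additively
lemma nat_band_pow (a i : Nat) : a % 2 ^ (i + 1) = a % 2 ^ i + (a &&& 2 ^ i) := by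
  rw [Nat.and_two_pow, Nat.testBit_eq_decide_div_mod_eq]
  have hmm : a % (2 ^ i * 2) = a % 2 ^ i + 2 ^ i * (a / 2 ^ i % 2) := Nat.mod_mul
  have hp : (2 : Nat) ^ (i + 1) = 2 ^ i * 2 := by rw [pow_succ]
  rcases Nat.mod_two_eq_zero_or_one (a / 2 ^ i) with h | h <;>
    simp [h, hp] at hmm ⊢ <;> omega

lemma nat_band_pow_cases (a i : Nat) : a &&& 2 ^ i = 0 ∨ a &&& 2 ^ i = 2 ^ i := by
  rw [Nat.and_two_pow]; cases a.testBit i <;> simp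

-- Python `cur & (1<<i)`: additive emod form plus the two possible values
lemma band_pow (cur : Int) (i : Nat) :
    cur % 2 ^ (i + 1) = cur % 2 ^ i + PySem.Int.band cur (2 ^ i) ∧
    (PySem.Int.band cur (2 ^ i) = 0 ∨ PySem.Int.band cur (2 ^ i) = 2 ^ i) := by
  have hpow : ((2 : Int) ^ i).toNat = 2 ^ i := by
    rw [show ((2:Int)^i) = ((2^i : Nat) : Int) by push_cast; ring]; exact Int.toNat_natCast _
  have h2i : (0 : Int) ≤ 2 ^ i := by positivity
  have hpowc : ∀ k : Nat, ((2 ^ k : Nat) : Int) = 2 ^ k := by intro k; push_cast; ring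
  unfold PySem.Int.band
  by_cases h : 0 ≤ cur
  · simp only [h, if_true, h2i, if_pos, hpow]
    set a := cur.toNat with ha
    have hcur : (a : Int) = cur := Int.toNat_of_nonneg h
    have hnat := nat_band_pow a i
    constructor
    · have : ((a % 2 ^ (i+1) : Nat) : Int) = ((a % 2 ^ i : Nat) : Int) + ((a &&& 2 ^ i : Nat) : Int) := by
        exact_mod_cast congrArg (Nat.cast : Nat → Int) hnat
      rw [natmod_cast, natmod_cast, hcur] at this
      exact this
    · rcases nat_band_pow_cases a i with hc | hc <;> rw [hc]
      · left; simp
      · right; rw [hpowc]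
  · simp only [h, if_false, h2i, if_pos, hpow]
    set n := (-cur - 1).toNat with hn
    have hcur : cur = -(n : Int) - 1 := by omega
    have hppos : ∀ k : Nat, (0 : Int) < 2 ^ k := fun k => by positivity
    have hie : ∀ k : Nat, cur % 2 ^ k = 2 ^ k - 1 - ((n % 2 ^ k : Nat) : Int) := by
      intro k; rw [hcur, neg_succ_emod n _ (hppos k), natmod_cast]
    rw [Nat.land_comm]
    have hnat := nat_band_pow n i
    have hble : n &&& 2 ^ i ≤ 2 ^ i := by rcases nat_band_pow_cases n i with hc | hc <;> omega
    have hcast : ((2 ^ i - (n &&& 2 ^ i) : Nat) : Int) = (2 ^ i : Int) - ((n &&& 2 ^ i : Nat) : Int) := by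
      push_cast [Nat.cast_sub hble]; ring
    have hnc : ((n % 2 ^ (i+1) : Nat) : Int) = ((n % 2 ^ i : Nat) : Int) + ((n &&& 2 ^ i : Nat) : Int) := by
      exact_mod_cast congrArg (Nat.cast : Nat → Int) hnat
    constructor
    · rw [hie (i+1), hie i, hcast, hnc]
      have h2 : ((2:Int) ^ (i+1)) = 2 * 2 ^ i := by ring
      rw [h2]; ring
    · rcases nat_band_pow_cases n i with hc | hc <;> rw [hc]
      · right; rw [Nat.sub_zero, hpowc]
      · left; simp

lemma nat_lsb (a i : Nat) (h : a % 2 ^ (i + 1) = 2 ^ i) :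
    a &&& (a - 1) = a - 2 ^ i := by
  have h2i : (0:Nat) < 2 ^ i := Nat.two_pow_pos i
  have hlt : (2:Nat) ^ i < 2 ^ (i+1) := by
    have : (2:Nat) ^ (i+1) = 2 ^ i * 2 := by rw [pow_succ]
    omega
  have ha : a = 2 ^ (i+1) * (a / 2 ^ (i+1)) + 2 ^ i := by
    conv_lhs => rw [← Nat.div_add_mod a (2 ^ (i+1))]
    omega
  set q := a / 2 ^ (i+1) with hq
  have ha1 : a - 1 = 2 ^ (i+1) * q + (2 ^ i - 1) := by omega
  have ha2 : a - 2 ^ i = 2 ^ (i+1) * q + 0 := by omega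
  rw [ha1, ha2]
  conv_lhs => rw [ha]
  apply Nat.eq_of_testBit_eq
  intro j
  rw [Nat.testBit_and,
    Nat.testBit_two_pow_mul_add _ hlt,
    Nat.testBit_two_pow_mul_add _ (by omega : 2 ^ i - 1 < 2 ^ (i+1)),
    Nat.testBit_two_pow_mul_add _ (by positivity : 0 < 2 ^ (i+1))]
  by_cases hj : j < i + 1
  · simp only [hj, if_true, Nat.zero_testBit]
    by_cases hji : j = i
    · subst hji
      simp [Nat.testBit_two_pow_sub_one]
    · have hfb : ((2:Nat) ^ i).testBit j = false := by
        rcases Nat.lt_or_ge j i with hlt' | hge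
        · rw [Nat.testBit_eq_decide_div_mod_eq]
          have hdiv : (2:Nat) ^ i / 2 ^ j = 2 ^ (i - j) := by
            rw [Nat.pow_div (by omega) (by norm_num)]
          rw [hdiv]
          have hmod : (2:Nat) ^ (i - j) % 2 = 0 := by
            have he : i - j = (i - j - 1) + 1 := by omega
            rw [he, pow_succ]; omega
          simp [hmod]
        · exact Nat.testBit_eq_false_of_lt
            (Nat.pow_lt_pow_right (by norm_num) (by omega))
      simp [hfb]
  · simp only [hj, if_false, Bool.and_self]

lemma exists_lsb : ∀ a : Nat, 0 < a → ∃ t, a % 2 ^ (t + 1) = 2 ^ t := by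
  intro a
  induction a using Nat.strong_induction_on with
  | _ a ih =>
    intro ha
    rcases Nat.mod_two_eq_zero_or_one a with h | h
    · have ha2 : 0 < a / 2 := by omega
      obtain ⟨t, ht⟩ := ih (a / 2) (by omega) ha2
      refine ⟨t + 1, ?_⟩
      have h2 : a = 2 * (a / 2) := by omega
      calc a % 2 ^ (t + 1 + 1) = (2 * (a / 2)) % (2 * 2 ^ (t + 1)) := by
            rw [← h2]; congr 1; ring
        _ = 2 * ((a / 2) % 2 ^ (t + 1)) := Nat.mul_mod_mul_left _ _ _
        _ = 2 ^ (t + 1) := by rw [ht]; ring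
    · exact ⟨0, by simpa using h⟩

-- bitLength of a positive int squeezed between powers of two
lemma bitLength_eq (m : Int) (p : Nat) (hp : 0 < p)
    (h1 : (2 ^ (p - 1) : Int) ≤ m) (h2 : m < 2 ^ p) :
    PySem.Int.bitLength m = p := by
  have hm : 0 < m := lt_of_lt_of_le (by positivity) h1
  have h1' : 2 ^ (p - 1) ≤ m.natAbs := by
    have : ((2 ^ (p-1) : Nat) : Int) ≤ m := by push_cast; exact h1
    omega
  have h2' : m.natAbs < 2 ^ p := by
    have : m < ((2 ^ p : Nat) : Int) := by push_cast; exact h2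
    omega
  have hub := PySem.Int.lt_two_pow_bitLength m
  have hlb := PySem.Int.two_pow_bitLength_le m (by omega)
  set L := PySem.Int.bitLength m with hL
  by_contra hne
  rcases Nat.lt_or_ge L p with h | h
  · have : (2:Nat) ^ L ≤ 2 ^ (p - 1) := Nat.pow_le_pow_right (by norm_num) (by omega)
    omega
  · have : (2:Nat) ^ p ≤ 2 ^ (L - 1) := Nat.pow_le_pow_right (by norm_num) (by omega)
    omega

lemma bitLength_gt (m : Int) (i : Nat) (h : (2 ^ i : Int) ≤ m) :
    i < PySem.Int.bitLength m := by
  have hm : 0 < m := lt_of_lt_of_le (by positivity) h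
  have h1' : 2 ^ i ≤ m.natAbs := by
    have : ((2 ^ i : Nat) : Int) ≤ m := by push_cast; exact h
    omega
  have hub := PySem.Int.lt_two_pow_bitLength m
  exact (Nat.pow_lt_pow_iff_right (by norm_num : (1:Nat) < 2)).mp (by omega)

-- Python `low & -low` for nonnegative low with lowest set bit i
lemma band_neg_self (low : Int) (i : Nat) (hl : 0 ≤ low)
    (h : low % 2 ^ (i + 1) = 2 ^ i) :
    PySem.Int.band low (-low) = 2 ^ i := by
  have hppos : (0:Int) < 2 ^ i := by positivity
  have hpos : 0 < low := by
    rcases lt_or_eq_of_le hl with h' | h'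
    · exact h'
    · exfalso; rw [← h'] at h; simp at h; omega
  set a := low.toNat with ha
  have hla : (a : Int) = low := Int.toNat_of_nonneg hl
  have hap : 0 < a := by omega
  unfold PySem.Int.band
  have h2 : ¬ 0 ≤ -low := by omega
  simp only [hl, if_true, h2, if_false]
  have h3 : (-(-low) - 1).toNat = a - 1 := by omega
  rw [h3]
  have hna : a % 2 ^ (i+1) = 2 ^ i := by
    have h4 : ((a % 2 ^ (i+1) : Nat) : Int) = 2 ^ i := by rw [natmod_cast, hla, h]
    have h5 : ((2 ^ i : Nat) : Int) = (2 : Int) ^ i := by push_cast; ring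
    omega
  rw [nat_lsb a i hna]
  have h2a : 2 ^ i ≤ a := by have := Nat.mod_le a (2 ^ (i+1)); omega
  have hfin : a - (a - 2 ^ i) = 2 ^ i := by omega
  show ((a - (a - 2 ^ i) : Nat) : Int) = 2 ^ i
  rw [hfin]; push_cast; ring

-- lower bound for `low & -low` when the low i bits of low are clear (nonnegative case)
lemma band_neg_self_ge (low : Int) (i : Nat) (hl : 0 ≤ low)
    (h : low % 2 ^ i = 0) (hg : PySem.Int.band low (-low) ≠ 0) :
    (2 ^ i : Int) ≤ PySem.Int.band low (-low) := by
  rcases lt_or_eq_of_le hl with hpos | hz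
  · set a := low.toNat with ha
    have hla : (a : Int) = low := Int.toNat_of_nonneg hl
    have hap : 0 < a := by omega
    obtain ⟨t, ht⟩ := exists_lsb a hap
    have hai : a % 2 ^ i = 0 := by
      have h4 : ((a % 2 ^ i : Nat) : Int) = 0 := by rw [natmod_cast, hla, h]
      omega
    have hti : i ≤ t := by
      by_contra hc
      have hdvd : (2 : Nat) ^ (t + 1) ∣ 2 ^ i := pow_dvd_pow 2 (by omega)
      have h0 : a % 2 ^ (t+1) = 0 := by
        have h5 := Nat.mod_mod_of_dvd a hdvd
        rw [hai] at h5
        simpa using h5.symm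
      have : (0:Nat) < 2 ^ t := Nat.two_pow_pos t
      omega
    have hlt : low % 2 ^ (t + 1) = 2 ^ t := by
      have h4 : ((a % 2 ^ (t+1) : Nat) : Int) = low % 2 ^ (t+1) := by rw [natmod_cast, hla]
      have h5 : ((2 ^ t : Nat) : Int) = (2:Int) ^ t := by push_cast; ring
      rw [← h4, ht, h5]
    rw [band_neg_self low t hl hlt]
    exact pow_le_pow_right₀ (by norm_num) hti
  · exfalso; apply hg; rw [← hz]; simp [PySem.Int.band]

-- emod of a negation, when the residue is nonzero
lemma neg_emod_eq (x m r : Int) (hm : 0 < m) (hx : x % m = r) (hr : r ≠ 0) :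
    (-x) % m = m - r := by
  have h0 : 0 ≤ r := hx ▸ Int.emod_nonneg x (by omega)
  have h1 : r < m := hx ▸ Int.emod_lt_of_pos x hm
  have hq := Int.ediv_add_emod x m
  rw [hx] at hq
  have he : -x = (m - r) + m * (-(x / m) - 1) := by linarith
  rw [he, Int.add_mul_emod_self_left]
  exact Int.emod_eq_of_lt (by omega) (by omega)

-- `cur & -cur` for any int with lowest set bit i
lemma band_neg_self_int (cur : Int) (i : Nat) (h : cur % 2 ^ (i + 1) = 2 ^ i) :
    PySem.Int.band cur (-cur) = 2 ^ i := by
  have hppos : (0:Int) < 2 ^ i := by positivity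
  by_cases hs : 0 ≤ cur
  · exact band_neg_self cur i hs h
  · have hlt : (2:Int) ^ i < 2 ^ (i+1) := by
      have : (2:Int) ^ (i+1) = 2 * 2 ^ i := by ring
      omega
    have h2 : (-cur) % 2 ^ (i+1) = 2 ^ i := by
      rw [neg_emod_eq cur (2 ^ (i+1)) (2 ^ i) (by positivity) h hppos.ne']
      have : (2:Int) ^ (i+1) = 2 * 2 ^ i := by ring
      omega
    have h3 := band_neg_self (-cur) i (by omega) h2
    rw [neg_neg] at h3
    rw [PySem.Int.band_comm]
    exact h3

-- lower bound for `cur & -cur` when the low i bits of cur are clear, any sign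
lemma band_neg_self_ge_int (cur : Int) (i : Nat)
    (h : cur % 2 ^ i = 0) (hg : PySem.Int.band cur (-cur) ≠ 0) :
    (2 ^ i : Int) ≤ PySem.Int.band cur (-cur) := by
  by_cases hs : 0 ≤ cur
  · exact band_neg_self_ge cur i hs h hg
  · have hd : (2:Int) ^ i ∣ cur := Int.dvd_of_emod_eq_zero h
    have h2 : (-cur) % 2 ^ i = 0 := Int.emod_eq_zero_of_dvd hd.neg_right
    have hg2 : PySem.Int.band (-cur) (-(-cur)) ≠ 0 := by
      rw [neg_neg, PySem.Int.band_comm]; exact hg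
    have h3 := band_neg_self_ge (-cur) i (by omega) h2 hg2
    rw [neg_neg, PySem.Int.band_comm (-cur) cur] at h3
    exact h3

-- B on A's "length > max_length" exit
lemma b_case1 (cur m : Int) (i : Nat) (hi : i ≤ 17)
    (hc : cur % 2 ^ i = 0) (hm2 : m < 2 ^ i)
    (hm1 : i = 0 ∨ (2 ^ (i - 1) : Int) ≤ m) :
    get_nxt_alt cur m = cur + (if i = 0 then 1 else 2 ^ (i - 1)) - 1 := by
  rcases hm1 with hiz | hmlo
  · subst hiz
    norm_num at hm2
    simp [get_nxt_alt, hm2]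
  · have hi0 : i ≠ 0 := by
      intro h0; subst h0; norm_num at hmlo hm2; omega
    have hm0 : ¬ m < 1 := by
      have : (0:Int) < 2 ^ (i - 1) := by positivity
      omega
    have hbl : PySem.Int.bitLength m = i := bitLength_eq m i (by omega) hmlo hm2
    have hstep : (1:Int) <<< (PySem.Int.bitLength m - 1) = 2 ^ (i - 1) := by
      rw [hbl, one_shl]
    have hcond : ¬ (PySem.Int.band cur (-cur) ≠ 0 ∧
        PySem.Int.band cur (-cur) ≤ (1:Int) <<< (PySem.Int.bitLength m - 1)) := by
      rintro ⟨hne, hle⟩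
      have hge := band_neg_self_ge_int cur i hc hne
      rw [hstep] at hle
      have : (2:Int) ^ (i - 1) < 2 ^ i := by
        have he : i = (i - 1) + 1 := by omega
        rw [he, pow_succ]
        have : (0:Int) < 2 ^ (i-1) := by positivity
        omega
      omega
    rw [hstep] at hcond
    simp only [get_nxt_alt, if_neg hm0, hstep, if_neg hcond, if_neg hi0]

-- B on A's "cur & (1<<i)" exit
lemma b_case2 (cur m : Int) (i : Nat) (hi : i ≤ 17)
    (hc : cur % 2 ^ (i + 1) = 2 ^ i) (hm : (2 ^ i : Int) ≤ m) :
    get_nxt_alt cur m = cur + 2 ^ i - 1 := by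
  have hppos : (0:Int) < 2 ^ i := by positivity
  have hm0 : ¬ m < 1 := by omega
  have hlow : PySem.Int.band cur (-cur) = 2 ^ i := band_neg_self_int cur i hc
  have hL : i < PySem.Int.bitLength m := bitLength_gt m i hm
  have hstep : (2:Int) ^ i ≤ (1:Int) <<< (PySem.Int.bitLength m - 1) := by
    rw [one_shl]
    exact pow_le_pow_right₀ (by norm_num) (by omega)
  simp only [get_nxt_alt, if_neg hm0, hlow]
  rw [if_pos ⟨hppos.ne', hstep⟩]

lemma loop_inv : ∀ (k : Nat), k ≤ 18 → ∀ (cur m ll : Int),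
    Pre_get_nxt cur m →
    cur % 2 ^ (18 - k) = 0 →
    ll = (if 18 - k = 0 then 1 else 2 ^ (18 - k - 1)) →
    (∀ j : Nat, j < 18 - k → (2 ^ j : Int) ≤ m) →
    get_nxt_loop cur m (List.range' (18 - k) k) ll = get_nxt_alt cur m := by
  intro k
  induction k with
  | zero =>
    intro _ cur m ll hpre hc hll hj
    exfalso
    apply hpre
    constructor
    · rw [show (262144:Int) = 2 ^ (18 - 0) by norm_num]; exact hc
    · have := hj 17 (by omega)
      norm_num at this; omega
  | succ k ih =>
    intro hk cur m ll hpre hc hll hj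
    set i := 18 - (k + 1) with hi
    have hik : 18 - k = i + 1 := by omega
    have hi17 : i ≤ 17 := by omega
    rw [List.range'_succ]
    simp only [get_nxt_loop, one_shl i]
    by_cases h1 : 2 ^ i > m
    · rw [if_pos h1, b_case1 cur m i hi17 hc h1 ?hm1]
      · rw [hll]
      · by_cases h0 : i = 0
        · exact Or.inl h0
        · exact Or.inr (hj (i - 1) (by omega))
    · rw [if_neg h1]
      push_neg at h1
      obtain ⟨hbp, hor⟩ := band_pow cur i
      by_cases h2 : PySem.Int.band cur (2 ^ i) ≠ 0
      · rw [if_pos h2]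
        have hband : PySem.Int.band cur (2 ^ i) = 2 ^ i := by
          rcases hor with h | h
          · exact absurd h h2
          · exact h
        exact (b_case2 cur m i hi17 (by rw [hbp, hc, hband, zero_add]) h1).symm
      · rw [if_neg h2]
        push_neg at h2
        have hc1 : cur % 2 ^ (i + 1) = 0 := by rw [hbp, hc, h2, zero_add]
        have h := ih (by omega) cur m (2 ^ i) hpre
          (by rw [hik]; exact hc1)
          (by rw [hik]; simp)
          (by intro j hj'; rw [hik] at hj'
              rcases Nat.lt_or_ge j i with hj2 | hj2
              · exact hj j hj2
              · have : j = i := by omega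
                rw [this]; exact h1)
        rw [hik] at h
        exact h

-- ===== VERDICT (by name: the statement is the Claim_ definition above) =====
theorem get_nxt_spec : Claim_equal_get_nxt := by
  intro cur m _ hpre
  unfold Spec_get_nxt get_nxt
  rw [List.range_eq_range']
  have h := loop_inv 18 (by omega) cur m 1 hpre (by simp) (by norm_num)
    (by intro j hj; omega)
  simpa using h
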